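-- pv_equiv track=rewrite | github.com/huytq000605/CF-CP | Codeforces Round #821 (Div. 2)/F.py | solve
-- ===== SOURCE A (Python) =====
-- from functools import lru_cache as cache
-- import math
--
-- def solve(n, x, y, a, b):
--     diffs = []
--     for i in range(n):
--         if a[i] != b[i]:
--             diffs.append(i)
--     if len(diffs) % 2 == 1:
--         return -1
--     if x >= y:
--         return solve1(x, y, diffs)
--     else:
--         return solve2(x, y, diffs)
--
-- def solve1(x, y, diffs):
--     if len(diffs) == 2 and diffs[0] + 1 == diffs[1]:
--         return min(x, y*2)
--     return y * len(diffs) // 2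
--
-- def solve2(x, y, diffs):
--     m = len(diffs)
--     @cache(None)
--     def dfs(i, drop):
--         if i >= m:
--             if drop == 0:
--                 return 0
--             return math.inf
--         result = dfs(i+1, drop+1)
--         if drop:
--             result = min(result, dfs(i+1, drop-1) + y)
--         if i < m-1:
--             result = min(result, dfs(i+2, drop) + min(y, x * (diffs[i+1] - diffs[i])))
--         return result
--     return dfs(0, 0)
-- ===== SOURCE B (Python) =====
-- def solve(n, x, y, a, b):
--     diffs = [i for i in range(n) if a[i] != b[i]]
--     m = len(diffs)
--     if m % 2 == 1:
--         return -1
--     if x >= y: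
--         if m == 2 and diffs[0] + 1 == diffs[1]:
--             return min(x, 2 * y)
--         return y * (m // 2)
--     # baseline: every pair costs y; subtract the max total saving obtainable by
--     # matching disjoint consecutive mismatches (linear backward DP, no memoized recursion)
--     ws = [y - min(y, x * (d1 - d0)) for d0, d1 in zip(diffs, diffs[1:])]
--     nxt = cur = 0
--     for w in reversed(ws):
--         nxt, cur = cur, max(cur, w + nxt)
--     return y * (m // 2) - cur
-- ===== Notes on version B (the rewrite author's own statement) =====
-- stated objective: alternative
-- what changed: A pairs the mismatched positions with a memoized recursion dfs(i, drop) over O(m^2) states; B computes the closed baseline y*(m/2) and subtracts the maximum total saving of disjoint consecutive mismatch pairs with a single linear backward DP pass.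
import Mathlib
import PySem

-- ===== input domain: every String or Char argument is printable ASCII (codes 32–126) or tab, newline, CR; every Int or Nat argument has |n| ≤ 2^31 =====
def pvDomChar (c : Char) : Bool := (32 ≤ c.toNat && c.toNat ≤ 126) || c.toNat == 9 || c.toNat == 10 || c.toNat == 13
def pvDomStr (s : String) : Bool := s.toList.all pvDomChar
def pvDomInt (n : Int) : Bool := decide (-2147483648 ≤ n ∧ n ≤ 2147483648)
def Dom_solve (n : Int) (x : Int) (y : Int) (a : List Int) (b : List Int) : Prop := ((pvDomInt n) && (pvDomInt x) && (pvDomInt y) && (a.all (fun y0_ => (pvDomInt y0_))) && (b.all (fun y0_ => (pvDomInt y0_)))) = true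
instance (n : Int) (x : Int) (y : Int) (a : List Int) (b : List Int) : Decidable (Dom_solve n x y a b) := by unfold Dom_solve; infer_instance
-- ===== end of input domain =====

-- B replaces A's memoized recursion dfs(i, drop) by the closed baseline y*(m/2) minus a
-- linear max-saving DP over consecutive mismatch pairs (objective: alternative).

-- ===== PORT A =====
-- Option Int models Python's int-or-math.inf: none = math.inf
def pvOmin (a b : Option Int) : Option Int :=
  match a, b with
  | none, b => b
  | a, none => a
  | some u, some v => some (min u v)

def pvOadd (a : Option Int) (c : Int) : Option Int := a.map (· + c)

-- A's dfs(i, drop): the index i into diffs is carried as the suffix diffs[i:], branches in source order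
def dfsA (x y : Int) : List Int → Nat → Option Int
  | [], drop => if drop = 0 then some 0 else none
  | [_], drop =>
      let r := dfsA x y [] (drop + 1)
      if drop > 0 then pvOmin r (pvOadd (dfsA x y [] (drop - 1)) y) else r
  | d :: d2 :: rest2, drop =>
      let r := dfsA x y (d2 :: rest2) (drop + 1)
      let r := if drop > 0 then pvOmin r (pvOadd (dfsA x y (d2 :: rest2) (drop - 1)) y) else r
      pvOmin r (pvOadd (dfsA x y rest2 drop) (min y (x * (d2 - d))))

def solveA1 (x y : Int) (diffs : List Int) : Int :=
  if diffs.length = 2 ∧ PySem.List.pyGetD diffs 0 0 + 1 = PySem.List.pyGetD diffs 1 0 then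
    min x (y * 2)
  else PySem.Int.floordiv (y * diffs.length) 2

def solve (n : Int) (x : Int) (y : Int) (a : List Int) (b : List Int) : Int :=
  let diffs := (PySem.List.pyRange 0 n 1).foldl
    (fun acc i => if PySem.List.pyGetD a i 0 != PySem.List.pyGetD b i 0 then acc ++ [i] else acc) []
  if diffs.length % 2 = 1 then -1
  else if x ≥ y then solveA1 x y diffs
  -- Python's dfs(0,0) is an int whenever |diffs| is even, so .getD 0 is exact here
  else (dfsA x y diffs 0).getD 0

-- ===== PORT B =====
def solve_alt (n : Int) (x : Int) (y : Int) (a : List Int) (b : List Int) : Int :=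
  let diffs := (PySem.List.pyRange 0 n 1).filter
    (fun i => PySem.List.pyGetD a i 0 != PySem.List.pyGetD b i 0)
  let m := diffs.length
  if m % 2 = 1 then -1
  else if x ≥ y then
    (if m = 2 ∧ PySem.List.pyGetD diffs 0 0 + 1 = PySem.List.pyGetD diffs 1 0 then min x (2 * y)
     else y * ((m / 2 : Nat) : Int))
  else
    y * ((m / 2 : Nat) : Int) -
      (((diffs.zip diffs.tail).map (fun p => y - min y (x * (p.2 - p.1)))).reverse.foldl
        (fun (s : Int × Int) w => (s.2, max s.2 (w + s.1))) ((0 : Int), (0 : Int))).2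

-- ===== PRECONDITION & SPEC =====
-- Pre_: Python A indexes a[i], b[i] for 0 ≤ i < n, raising IndexError if either list is shorter than n
def Pre_solve (n : Int) (x : Int) (y : Int) (a : List Int) (b : List Int) : Prop :=
  n ≤ (a.length : Int) ∧ n ≤ (b.length : Int) ∨ n ≤ 0
instance (n : Int) (x : Int) (y : Int) (a : List Int) (b : List Int) : Decidable (Pre_solve n x y a b) := by unfold Pre_solve; infer_instance

def pvWitness_solve : Int × Int × Int × List Int × List Int := (2, 1, 3, [0, 1], [1, 1])

def Spec_solve (n : Int) (x : Int) (y : Int) (a : List Int) (b : List Int) (out : Int) : Prop := out = solve_alt n x y a b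
instance (n : Int) (x : Int) (y : Int) (a : List Int) (b : List Int) (out : Int) : Decidable (Spec_solve n x y a b out) := by unfold Spec_solve; infer_instance

-- ===== CLAIM (what is proved, stated in full; the proofs are below) =====
def Claim_equal_solve : Prop := ∀ (n : Int) (x : Int) (y : Int) (a : List Int) (b : List Int), Dom_solve n x y a b → Pre_solve n x y a b → Spec_solve n x y a b (solve n x y a b)


-- ===== LEMMAS AND PROOFS =====

-- max-weight selection of pairwise non-adjacent weights (unbounded)
def pvMIS : List Int → Int
  | [] => 0
  | [w] => max 0 w
  | w :: w2 :: r => max (pvMIS (w2 :: r)) (w + pvMIS r)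

-- the same, selecting at most k weights
def pvM : List Int → Nat → Int
  | _, 0 => 0
  | [], _ + 1 => 0
  | [w], _ + 1 => max 0 w
  | w :: w2 :: r, k + 1 => max (pvM (w2 :: r) (k + 1)) (w + pvM r k)

-- the list of pair weights y - min(y, x*(d2-d)) over consecutive diffs
def pvW (x y : Int) : List Int → List Int
  | [] => []
  | [_] => []
  | d :: d2 :: r => (y - min y (x * (d2 - d))) :: pvW x y (d2 :: r)

theorem pvM_nonneg (ws : List Int) (k : Nat) : 0 ≤ pvM ws k := by
  induction ws, k using pvM.induct with
  | case1 => simp [pvM]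
  | case2 => simp [pvM]
  | case3 => simp [pvM]
  | case4 w w2 r k ih1 ih2 => simp only [pvM]; exact le_trans ih1 (le_max_left _ _)

theorem pvM_mono (ws : List Int) (k : Nat) : pvM ws k ≤ pvM ws (k + 1) := by
  induction ws, k using pvM.induct with
  | case1 ws =>
      match ws with
      | [] => simp [pvM]
      | [w] => simp [pvM]
      | w :: w2 :: r => simp only [pvM]; exact le_trans (pvM_nonneg _ _) (le_max_left _ _)
  | case2 => simp [pvM]
  | case3 => simp [pvM]
  | case4 w w2 r k ih1 ih2 => simp only [pvM]; exact max_le_max ih1 (by omega)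

theorem pvM_eq_MIS : ∀ (ws : List Int) (k : Nat), ws.length ≤ 2 * k → pvM ws k = pvMIS ws := by
  intro ws
  induction ws using pvMIS.induct with
  | case1 => intro k h; cases k <;> simp [pvM, pvMIS]
  | case2 w =>
      intro k h
      obtain ⟨k', rfl⟩ : ∃ k', k = k' + 1 := ⟨k - 1, by simp at h; omega⟩
      simp [pvM, pvMIS]
  | case3 w w2 r ih1 ih2 =>
      intro k h
      simp only [List.length_cons] at h
      obtain ⟨k', rfl⟩ : ∃ k', k = k' + 1 := ⟨k - 1, by omega⟩
      simp only [pvM, pvMIS]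
      rw [ih1 (k' + 1) (by simp; omega), ih2 k' (by omega)]

theorem pvW_len (x y : Int) (l : List Int) : (pvW x y l).length = l.length - 1 := by
  induction l using pvW.induct with
  | case1 => simp [pvW]
  | case2 => simp [pvW]
  | case3 d d2 r ih => simp [pvW, ih]

theorem pvW_eq_zip (x y : Int) (l : List Int) :
    pvW x y l = (l.zip l.tail).map (fun p => y - min y (x * (p.2 - p.1))) := by
  induction l using pvW.induct with
  | case1 => simp [pvW]
  | case2 => simp [pvW]
  | case3 d d2 r ih => simp [pvW, ih]

theorem pvMIS_cons (w : Int) (rest : List Int) :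
    pvMIS (w :: rest) = max (pvMIS rest) (w + pvMIS rest.tail) := by
  cases rest <;> simp [pvMIS]

theorem fold_rev (ws : List Int) :
    ws.reverse.foldl (fun (s : Int × Int) w => (s.2, max s.2 (w + s.1))) ((0 : Int), (0 : Int))
      = (pvMIS ws.tail, pvMIS ws) := by
  induction ws with
  | nil => simp [pvMIS]
  | cons w rest ih => simp [List.foldl_append, ih, pvMIS_cons]

-- dfs(i, drop) on the suffix l = diffs[i:] equals the baseline minus the best capped
-- saving over disjoint consecutive pairs, and is math.inf exactly off parity/range
theorem dfs_char (x y : Int) (l : List Int) (drop : Nat) :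
    dfsA x y l drop =
      if (l.length + drop) % 2 = 0 ∧ drop ≤ l.length
      then some (y * (((l.length + drop) / 2 : Nat) : Int) - pvM (pvW x y l) ((l.length - drop) / 2))
      else none := by
  refine dfsA.induct x y
    (motive := fun l drop => dfsA x y l drop =
      if (l.length + drop) % 2 = 0 ∧ drop ≤ l.length
      then some (y * (((l.length + drop) / 2 : Nat) : Int) - pvM (pvW x y l) ((l.length - drop) / 2))
      else none) ?_ ?_ ?_ ?_ ?_ l drop
  · simp [dfsA, pvM, pvW]
  · intro drop h
    simp only [List.length_nil]
    rw [if_neg (by omega)]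
    simp [dfsA, h]
  · intro head drop hpos ih1 ih2
    simp only [dfsA, List.length_nil, List.length_cons]
    rw [if_neg (show ¬(drop + 1 = 0) by omega)]
    by_cases h1 : drop = 1
    · subst h1
      norm_num [pvOmin, pvOadd, pvM, pvW]
    · rw [if_neg (show ¬(drop - 1 = 0) by omega),
         if_neg (show ¬((0 + 1 + drop) % 2 = 0 ∧ drop ≤ 0 + 1) by omega)]
      simp [pvOmin, pvOadd]
  · intro head drop hpos ih1
    simp only [dfsA, List.length_nil, List.length_cons]
    rw [if_neg (show ¬(drop + 1 = 0) by omega),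
       if_neg (show ¬((0 + 1 + drop) % 2 = 0 ∧ drop ≤ 0 + 1) by omega), if_neg hpos]
  · intro d d2 rest2 drop ih1 ih2 ih3
    simp only [dfsA, ih1, ih2, ih3, List.length_cons]
    by_cases hp : (rest2.length + drop) % 2 = 0
    · by_cases hd : drop ≤ rest2.length
      · -- main region: all three branches admitted
        rw [if_pos (show (rest2.length + 1 + (drop + 1)) % 2 = 0 ∧ drop + 1 ≤ rest2.length + 1 by omega),
           if_pos (show (rest2.length + drop) % 2 = 0 ∧ drop ≤ rest2.length by omega),
           if_pos (show (rest2.length + 1 + 1 + drop) % 2 = 0 ∧ drop ≤ rest2.length + 1 + 1 by omega)]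
        have hB2 : (rest2.length + 1 + (drop + 1)) / 2 = (rest2.length + drop) / 2 + 1 := by omega
        have hB3 : (rest2.length + 1 + 1 + drop) / 2 = (rest2.length + drop) / 2 + 1 := by omega
        have hK1 : (rest2.length + 1 - (drop + 1)) / 2 = (rest2.length - drop) / 2 := by omega
        have hKr : (rest2.length + 1 + 1 - drop) / 2 = (rest2.length - drop) / 2 + 1 := by omega
        rw [hB2, hB3, hK1, hKr]
        by_cases hdz : drop = 0
        · subst hdz
          rw [if_neg (show ¬((0:Nat) > 0) by omega)]
          cases rest2 with
          | nil => norm_num [pvOmin, pvOadd, pvM, pvW]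
          | cons e r' =>
              have hcap : pvM (pvW x y (d2 :: e :: r')) (((e :: r').length - 0) / 2)
                  = pvM (pvW x y (d2 :: e :: r')) (((e :: r').length - 0) / 2 + 1) := by
                rw [pvM_eq_MIS _ _ (by rw [pvW_len]; simp only [List.length_cons] at hp ⊢; omega),
                   pvM_eq_MIS _ _ (by rw [pvW_len]; simp only [List.length_cons] at hp ⊢; omega)]
              rw [hcap]
              simp only [pvOmin, pvOadd, Option.map_some, pvW, pvM]
              generalize pvM ((y - min y (x * (e - d2))) :: pvW x y (e :: r')) (((e :: r').length - 0) / 2 + 1) = M1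
              generalize pvM (pvW x y (e :: r')) (((e :: r').length - 0) / 2) = M2
              generalize hq : ((e :: r').length + 0) / 2 = q
              generalize hz : x * (d2 - d) = z
              push_cast
              rw [show y * ((q : Int) + 1) = y * q + y by ring]
              generalize y * (q : Int) = u
              simp only [Option.some.injEq]
              omega
        · have hpos : drop > 0 := by omega
          rw [if_pos hpos,
             if_pos (show (rest2.length + 1 + (drop - 1)) % 2 = 0 ∧ drop - 1 ≤ rest2.length + 1 by omega)]
          have hB2' : (rest2.length + 1 + (drop - 1)) / 2 = (rest2.length + drop) / 2 := by omega
          have hK2 : (rest2.length + 1 - (drop - 1)) / 2 = (rest2.length - drop) / 2 + 1 := by omega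
          rw [hB2', hK2]
          cases rest2 with
          | nil => simp only [List.length_nil] at hd; omega
          | cons e r' =>
              have hm : pvM (pvW x y (d2 :: e :: r')) (((e :: r').length - drop) / 2)
                  ≤ pvM (pvW x y (d2 :: e :: r')) (((e :: r').length - drop) / 2 + 1) := pvM_mono _ _
              simp only [pvOmin, pvOadd, Option.map_some, pvW, pvM] at hm ⊢
              generalize pvM ((y - min y (x * (e - d2))) :: pvW x y (e :: r')) (((e :: r').length - drop) / 2) = Ma at hm ⊢
              generalize pvM ((y - min y (x * (e - d2))) :: pvW x y (e :: r')) (((e :: r').length - drop) / 2 + 1) = M1 at hm ⊢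
              generalize pvM (pvW x y (e :: r')) (((e :: r').length - drop) / 2) = M2
              generalize hq : ((e :: r').length + drop) / 2 = q
              generalize hz : x * (d2 - d) = z
              push_cast
              rw [show y * ((q : Int) + 1) = y * q + y by ring]
              generalize y * (q : Int) = u
              simp only [Option.some.injEq]
              omega
      · by_cases he : drop = rest2.length + 2
        · -- drop fills the whole suffix: only the pop branch survives
          rw [if_pos (show drop > 0 by omega),
             if_neg (show ¬((rest2.length + 1 + (drop + 1)) % 2 = 0 ∧ drop + 1 ≤ rest2.length + 1) by omega),
             if_pos (show (rest2.length + 1 + (drop - 1)) % 2 = 0 ∧ drop - 1 ≤ rest2.length + 1 by omega),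
             if_neg (show ¬((rest2.length + drop) % 2 = 0 ∧ drop ≤ rest2.length) by omega),
             if_pos (show (rest2.length + 1 + 1 + drop) % 2 = 0 ∧ drop ≤ rest2.length + 1 + 1 by omega)]
          subst he
          rw [show (rest2.length + 1 + (rest2.length + 2 - 1)) / 2 = rest2.length + 1 by omega,
             show (rest2.length + 1 - (rest2.length + 2 - 1)) / 2 = 0 by omega,
             show (rest2.length + 1 + 1 + (rest2.length + 2)) / 2 = rest2.length + 2 by omega,
             show (rest2.length + 1 + 1 - (rest2.length + 2)) / 2 = 0 by omega]
          simp only [pvOmin, pvOadd, Option.map_some, Option.map_none, pvM]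
          push_cast
          ring_nf
        · -- out of range: every branch is math.inf
          rw [if_pos (show drop > 0 by omega),
             if_neg (show ¬((rest2.length + 1 + (drop + 1)) % 2 = 0 ∧ drop + 1 ≤ rest2.length + 1) by omega),
             if_neg (show ¬((rest2.length + 1 + (drop - 1)) % 2 = 0 ∧ drop - 1 ≤ rest2.length + 1) by omega),
             if_neg (show ¬((rest2.length + drop) % 2 = 0 ∧ drop ≤ rest2.length) by omega),
             if_neg (show ¬((rest2.length + 1 + 1 + drop) % 2 = 0 ∧ drop ≤ rest2.length + 1 + 1) by omega)]
          simp [pvOmin, pvOadd]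
    · -- parity off: every branch is math.inf
      rw [if_neg (show ¬((rest2.length + 1 + (drop + 1)) % 2 = 0 ∧ drop + 1 ≤ rest2.length + 1) by omega),
         if_neg (show ¬((rest2.length + drop) % 2 = 0 ∧ drop ≤ rest2.length) by omega),
         if_neg (show ¬((rest2.length + 1 + 1 + drop) % 2 = 0 ∧ drop ≤ rest2.length + 1 + 1) by omega)]
      by_cases hpos : drop > 0
      · rw [if_pos hpos,
           if_neg (show ¬((rest2.length + 1 + (drop - 1)) % 2 = 0 ∧ drop - 1 ≤ rest2.length + 1) by omega)]
        simp [pvOmin, pvOadd]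
      · rw [if_neg hpos]
        simp [pvOmin, pvOadd]

-- ===== VERDICT (by name: the statement is the Claim_ definition above) =====
theorem solve_spec : Claim_equal_solve := by
  intro n x y a b _ _
  unfold Spec_solve
  have hdl : List.foldl
      (fun acc i => if (PySem.List.pyGetD a i 0 != PySem.List.pyGetD b i 0) = true then acc ++ [i] else acc)
      [] (PySem.List.pyRange 0 n 1)
      = List.filter (fun i => PySem.List.pyGetD a i 0 != PySem.List.pyGetD b i 0) (PySem.List.pyRange 0 n 1) := by
    simpa using PySem.List.foldl_append_if_eq_filter
      (fun i => PySem.List.pyGetD a i 0 != PySem.List.pyGetD b i 0) (PySem.List.pyRange 0 n 1) []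
  unfold solve solve_alt
  rw [hdl]
  set diffs := (PySem.List.pyRange 0 n 1).filter
    (fun i => PySem.List.pyGetD a i 0 != PySem.List.pyGetD b i 0) with hdiffs
  by_cases h1 : diffs.length % 2 = 1
  · rw [if_pos h1, if_pos h1]
  · rw [if_neg h1, if_neg h1]
    by_cases h2 : x ≥ y
    · rw [if_pos h2, if_pos h2]
      unfold solveA1
      by_cases h3 : diffs.length = 2 ∧ PySem.List.pyGetD diffs 0 0 + 1 = PySem.List.pyGetD diffs 1 0
      · rw [if_pos h3, if_pos h3, mul_comm]
      · rw [if_neg h3, if_neg h3]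
        obtain ⟨t, ht⟩ : ∃ t, diffs.length = 2 * t := ⟨diffs.length / 2, by omega⟩
        rw [ht]
        rw [show ((2 * t : Nat) : Int) = ((t : Int)) * 2 by push_cast; ring]
        rw [show y * ((t : Int) * 2) = (y * t) * 2 by ring]
        rw [PySem.Int.floordiv_eq_ediv_of_pos (by norm_num)]
        rw [Int.mul_ediv_cancel _ (by norm_num)]
        congr 1
        omega
    · rw [if_neg h2, if_neg h2, dfs_char, if_pos (⟨by omega, by omega⟩ :
        (diffs.length + 0) % 2 = 0 ∧ 0 ≤ diffs.length)]
      rw [← pvW_eq_zip, fold_rev]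
      simp only [Option.getD_some]
      rw [pvM_eq_MIS _ _ (by rw [pvW_len]; omega)]
      norm_num
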